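-- pv_equiv track=rewrite | github.com/teamWSIZ/python1-2022 | src/algo/zad12/sol_A.py | get_min_number_of_operations
-- ===== SOURCE A (Python) =====
-- def get_min_number_of_operations(a: list[int]) -> int:
--     count = 0
--     length = len(a)
--     end = 0
--     while length > end:
--         if a[end] < 0:
--             count = count +1
--             while a[end] <= 0:
--                    end = end+1
--                    if length == end: break
--         end = end +1
--     return count
-- ===== SOURCE B (Python) =====
-- def get_min_number_of_operations(a: list[int]) -> int:
--     # one fold with a "current non-positive segment contains a negative" flag
--     count = 0
--     seg_has_neg = False
--     for x in a:
--         if x > 0: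
--             count += seg_has_neg
--             seg_has_neg = False
--         else:
--             seg_has_neg = seg_has_neg or x < 0
--     return count + seg_has_neg
-- ===== Notes on version B (the rewrite author's own statement) =====
-- stated objective: simpler
-- what changed: Replaced the nested run-consuming while loops over an explicit index with a single for-loop fold carrying a boolean 'current non-positive run contains a negative' flag, added to the count at each positive element and once at the end.
import Mathlib
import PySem

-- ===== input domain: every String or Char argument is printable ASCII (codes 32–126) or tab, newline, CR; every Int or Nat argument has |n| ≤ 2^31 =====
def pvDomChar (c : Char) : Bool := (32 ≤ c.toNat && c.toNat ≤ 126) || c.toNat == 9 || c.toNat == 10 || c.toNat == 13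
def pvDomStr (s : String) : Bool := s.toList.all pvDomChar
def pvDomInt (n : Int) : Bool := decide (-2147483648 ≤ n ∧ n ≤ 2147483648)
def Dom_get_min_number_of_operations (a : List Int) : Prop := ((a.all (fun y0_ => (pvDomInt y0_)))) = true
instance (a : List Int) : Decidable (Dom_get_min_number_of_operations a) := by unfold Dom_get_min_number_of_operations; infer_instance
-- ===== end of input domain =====

-- B replaces A's nested index-driven while loops by a single fold with a
-- "current non-positive run contains a negative" flag (objective: simpler).


-- ===== PORT A =====
-- inner while loop: 'while a[end] <= 0: end += 1; if length == end: break'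
def pvInnerA (a : List Int) (e : Nat) : Nat :=
  if h : e < a.length then
    if a[e] ≤ 0 then pvInnerA a (e + 1) else e
  else e
termination_by a.length - e

theorem pvInnerA_ge (a : List Int) (e : Nat) : e ≤ pvInnerA a e := by
  unfold pvInnerA
  split
  · split
    · exact le_trans (Nat.le_succ e) (pvInnerA_ge a (e + 1))
    · exact le_refl e
  · exact le_refl e
termination_by a.length - e

-- outer while loop of A
def pvOuterA (a : List Int) (count : Int) (e : Nat) : Int :=
  if h : e < a.length then
    if a[e] < 0 then pvOuterA a (count + 1) (pvInnerA a e + 1)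
    else pvOuterA a count (e + 1)
  else count
termination_by a.length - e
decreasing_by
  · have := pvInnerA_ge a e; omega
  · omega

def get_min_number_of_operations (a : List Int) : Int := pvOuterA a 0 0

-- ===== PORT B =====
def get_min_number_of_operations_alt (a : List Int) : Int :=
  let r := a.foldl
    (fun (s : Int × Bool) x =>
      if x > 0 then (s.1 + (if s.2 then 1 else 0), false)
      else (s.1, s.2 || decide (x < 0)))
    (0, false)
  r.1 + (if r.2 then 1 else 0)

-- ===== PRECONDITION & SPEC =====
def Spec_get_min_number_of_operations (a : List Int) (out : Int) : Prop := out = get_min_number_of_operations_alt a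
instance (a : List Int) (out : Int) : Decidable (Spec_get_min_number_of_operations a out) := by unfold Spec_get_min_number_of_operations; infer_instance

-- ===== CLAIM (what is proved, stated in full; the proofs are below) =====
def Claim_equal_get_min_number_of_operations : Prop := ∀ (a : List Int), Dom_get_min_number_of_operations a → Spec_get_min_number_of_operations a (get_min_number_of_operations a)

-- ===== LEMMAS AND PROOFS =====

-- reference count: number of maximal non-positive runs containing a negative,
-- with flag f = "the run in progress already has a negative"
def pvCnt : List Int → Bool → Int
  | [], f => if f then 1 else 0
  | x :: xs, f =>
    if x > 0 then (if f then 1 else 0) + pvCnt xs false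
    else pvCnt xs (f || decide (x < 0))

theorem pvDrop_cons (a : List Int) (e : Nat) (h : e < a.length) :
    a.drop e = a[e] :: a.drop (e + 1) := by
  exact List.drop_eq_getElem_cons h

theorem pvInner_cnt (a : List Int) (e : Nat) :
    pvCnt (a.drop e) true = 1 + pvCnt (a.drop (pvInnerA a e + 1)) false := by
  unfold pvInnerA
  split
  · rename_i h
    rw [pvDrop_cons a e h]
    split
    · rename_i hle
      have hx : ¬ a[e] > 0 := by omega
      simp only [pvCnt, if_neg hx, Bool.true_or]
      exact pvInner_cnt a (e + 1)
    · rename_i hpos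
      have hx : a[e] > 0 := by omega
      simp [pvCnt, hx]
  · rename_i h
    have h1 : a.length ≤ e := by omega
    rw [List.drop_eq_nil_of_le h1, List.drop_eq_nil_of_le (by omega)]
    simp [pvCnt]
termination_by a.length - e

theorem pvOuter_cnt (a : List Int) (count : Int) (e : Nat) :
    pvOuterA a count e = count + pvCnt (a.drop e) false := by
  unfold pvOuterA
  split
  · rename_i h
    rw [pvDrop_cons a e h]
    split
    · rename_i hneg
      have hx : ¬ a[e] > 0 := by omega
      simp only [pvCnt, if_neg hx, Bool.false_or, decide_eq_true hneg]
      rw [pvOuter_cnt a (count + 1) (pvInnerA a e + 1)]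
      have hinner : pvInnerA a e = pvInnerA a (e + 1) := by
        rw [pvInnerA]; simp [h, le_of_lt hneg]
      rw [hinner, pvInner_cnt a (e + 1)]
      ring
    · rename_i hnneg
      rw [pvOuter_cnt a count (e + 1)]
      by_cases hx : a[e] > 0
      · simp [pvCnt, hx]
      · have : ¬ a[e] < 0 := hnneg
        simp [pvCnt, hx, this]
  · rename_i h
    rw [List.drop_eq_nil_of_le (by omega)]
    simp [pvCnt]
termination_by a.length - e
decreasing_by
  all_goals (have := pvInnerA_ge a e; omega)

theorem pvFoldl_cnt (xs : List Int) (c : Int) (f : Bool) :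
    (xs.foldl
      (fun (s : Int × Bool) x =>
        if x > 0 then (s.1 + (if s.2 then 1 else 0), false)
        else (s.1, s.2 || decide (x < 0)))
      (c, f)).1
    + (if (xs.foldl
        (fun (s : Int × Bool) x =>
          if x > 0 then (s.1 + (if s.2 then 1 else 0), false)
          else (s.1, s.2 || decide (x < 0)))
        (c, f)).2 then 1 else 0)
    = c + pvCnt xs f := by
  induction xs generalizing c f with
  | nil => simp [pvCnt]
  | cons x xs ih =>
    by_cases hx : x > 0
    · simp only [List.foldl_cons, if_pos hx, pvCnt, ih]; ring
    · simp only [List.foldl_cons, if_neg hx, pvCnt, ih]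

-- ===== VERDICT (by name: the statement is the Claim_ definition above) =====
theorem get_min_number_of_operations_spec : Claim_equal_get_min_number_of_operations := by
  intro a _
  unfold Spec_get_min_number_of_operations get_min_number_of_operations get_min_number_of_operations_alt
  rw [pvOuter_cnt a 0 0]
  simpa using (pvFoldl_cnt a 0 false).symm
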